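-- pv_equiv track=rewrite | github.com/KyouGit/ai_research_portfolio | archive/cleanup_20260303_055755/Transformer_Paper_Repro/experiment.py | tokenize_text
-- ===== SOURCE A (Python) =====
-- def tokenize_text(lines: list[str]) -> list[str]:
--     tokens: list[str] = []
--     for line in lines:
--         line = line.strip().lower()
--         if not line:
--             continue
--         tokens.extend(line.split())
--     return tokens
-- ===== SOURCE B (Python) =====
-- def tokenize_text(lines: list[str]) -> list[str]:
--     return "\n".join(lines).lower().split()
-- ===== Notes on version B (the rewrite author's own statement) =====
-- stated objective: simpler
-- what changed: Replaces the per-line loop (strip, lower, empty check, split, extend) with a single whole-text expression: join all lines with newlines, lowercase once, and split once; newline separators are themselves whitespace delimiters, so per-line strip and empty-line skipping become no-ops.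
import Mathlib
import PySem

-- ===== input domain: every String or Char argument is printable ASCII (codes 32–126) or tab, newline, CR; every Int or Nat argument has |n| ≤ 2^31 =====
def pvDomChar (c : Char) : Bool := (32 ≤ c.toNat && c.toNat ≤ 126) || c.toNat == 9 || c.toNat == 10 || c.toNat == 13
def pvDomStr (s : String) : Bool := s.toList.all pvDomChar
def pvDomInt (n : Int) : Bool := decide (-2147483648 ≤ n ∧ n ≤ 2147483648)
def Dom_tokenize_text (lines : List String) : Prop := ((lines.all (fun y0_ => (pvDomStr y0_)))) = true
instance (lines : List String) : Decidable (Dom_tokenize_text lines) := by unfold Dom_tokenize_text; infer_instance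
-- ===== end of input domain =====

-- B replaces A's per-line loop (strip/lower/skip-empty/split/extend) by one whole-text
-- join + lower + split expression; same cost, simpler decomposition.

-- ===== PORT A =====
def tokenize_text (lines : List String) : List String :=
  lines.foldl (fun tokens line =>
    let line' := PySem.Str.lower (PySem.Str.strip line)
    if line' = "" then tokens
    else tokens ++ PySem.Str.split₀ line') []

-- ===== PORT B =====
def tokenize_text_alt (lines : List String) : List String :=
  PySem.Str.split₀ (PySem.Str.lower (PySem.Str.join "\n" lines))

-- ===== PRECONDITION & SPEC =====
def Spec_tokenize_text (lines : List String) (out : List String) : Prop := out = tokenize_text_alt lines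
instance (lines : List String) (out : List String) : Decidable (Spec_tokenize_text lines out) := by unfold Spec_tokenize_text; infer_instance

-- ===== CLAIM (what is proved, stated in full; the proofs are below) =====
def Claim_equal_tokenize_text : Prop := ∀ (lines : List String), Dom_tokenize_text lines → Spec_tokenize_text lines (tokenize_text lines)

-- ===== LEMMAS AND PROOFS =====

theorem go_acc (s : List Char) : ∀ (cur : List Char) (acc : List (List Char)),
    PySem.Chars.split₀.go s cur acc = acc.reverse ++ PySem.Chars.split₀.go s cur [] := by
  induction s with
  | nil => intro cur acc; simp [PySem.Chars.split₀.go]; split <;> simp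
  | cons c rest ih =>
    intro cur acc
    simp only [PySem.Chars.split₀.go]
    split
    · split
      · rw [ih [] acc]
      · rw [ih [] (cur.reverse :: acc), ih [] [cur.reverse]]; simp
    · rw [ih (c :: cur) acc]

theorem go_append_space {c : Char} (hc : PySem.Chars.isspace c = true) (b : List Char) :
    ∀ (a cur : List Char),
    PySem.Chars.split₀.go (a ++ c :: b) cur [] =
      PySem.Chars.split₀.go a cur [] ++ PySem.Chars.split₀.go b [] [] := by
  intro a
  induction a with
  | nil =>
    intro cur
    simp only [List.nil_append, PySem.Chars.split₀.go, hc, if_true]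
    split
    · simp [*]
    · rw [go_acc b [] [cur.reverse]]
  | cons d a' ih =>
    intro cur
    simp only [List.cons_append, PySem.Chars.split₀.go]
    split
    · split
      · exact ih []
      · rw [go_acc (a' ++ c :: b) [] [cur.reverse], go_acc a' [] [cur.reverse], ih []]; simp
    · exact ih (d :: cur)

theorem isspace_lowerChar (c : Char) : PySem.Chars.isspace (PySem.Chars.lowerChar c) = PySem.Chars.isspace c := by
  by_cases h : PySem.Chars.isupper c = true
  · obtain ⟨h1, h2⟩ : 65 ≤ c.toNat ∧ c.toNat ≤ 90 := by
      simp only [PySem.Chars.isupper, Bool.and_eq_true, decide_eq_true_eq, Char.le_def] at h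
      exact ⟨h.1, h.2⟩
    have hv : (c.toNat + 32).isValidChar := Or.inl (by omega)
    have ht : (Char.ofNat (c.toNat + 32)).toNat = c.toNat + 32 := by simp [Char.ofNat, hv]
    have e1 : PySem.Chars.isspace (Char.ofNat (c.toNat + 32)) = false := by
      simp only [PySem.Chars.isspace, ht, Bool.or_eq_false_iff, Bool.and_eq_false_iff,
        decide_eq_false_iff_not]
      omega
    have e2 : PySem.Chars.isspace c = false := by
      simp only [PySem.Chars.isspace, Bool.or_eq_false_iff, Bool.and_eq_false_iff,
        decide_eq_false_iff_not]
      omega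
    simp only [PySem.Chars.lowerChar, h, if_true, e1, e2]
  · simp [PySem.Chars.lowerChar, h]

theorem split₀_append_space {c : Char} (hc : PySem.Chars.isspace c = true) (a b : List Char) :
    PySem.Chars.split₀ (a ++ c :: b) = PySem.Chars.split₀ a ++ PySem.Chars.split₀ b := by
  simpa [PySem.Chars.split₀] using go_append_space hc b a []

theorem split₀_allspace {w : List Char} (hw : ∀ x ∈ w, PySem.Chars.isspace x = true) :
    PySem.Chars.split₀ w = [] := by
  induction w with
  | nil => rfl
  | cons c w' ih =>
    have hc := hw c (List.mem_cons_self ..)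
    simp only [PySem.Chars.split₀, PySem.Chars.split₀.go, hc, if_true, List.isEmpty_nil]
    exact ih (fun x hx => hw x (List.mem_cons_of_mem _ hx))

theorem split₀_space_suffix {w : List Char} (hw : ∀ x ∈ w, PySem.Chars.isspace x = true)
    (a : List Char) : PySem.Chars.split₀ (a ++ w) = PySem.Chars.split₀ a := by
  cases w with
  | nil => simp
  | cons c w' =>
    rw [split₀_append_space (hw c (List.mem_cons_self ..)) a w',
      split₀_allspace (fun x hx => hw x (List.mem_cons_of_mem _ hx))]
    simp

theorem split₀_space_prefix {w : List Char} (hw : ∀ x ∈ w, PySem.Chars.isspace x = true)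
    (a : List Char) : PySem.Chars.split₀ (w ++ a) = PySem.Chars.split₀ a := by
  induction w with
  | nil => rfl
  | cons c w' ih =>
    have hc := hw c (List.mem_cons_self ..)
    simp only [List.cons_append, PySem.Chars.split₀, PySem.Chars.split₀.go, hc, if_true,
      List.isEmpty_nil]
    exact ih (fun x hx => hw x (List.mem_cons_of_mem _ hx))

theorem split₀_strip (s : List Char) :
    PySem.Chars.split₀ (PySem.Chars.strip s) = PySem.Chars.split₀ s := by
  have hl : PySem.Chars.split₀ (PySem.Chars.lstrip s) = PySem.Chars.split₀ s := by
    conv_rhs => rw [← List.takeWhile_append_dropWhile (p := PySem.Chars.isspace) (l := s)]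
    rw [split₀_space_prefix (fun x hx => List.mem_takeWhile_imp hx)]
    rfl
  set t := PySem.Chars.lstrip s with ht
  rw [PySem.Chars.strip, ← ht, ← hl]
  have hdecomp : t = PySem.Chars.rstrip t ++ (t.reverse.takeWhile PySem.Chars.isspace).reverse := by
    rw [PySem.Chars.rstrip, ← List.reverse_append, List.takeWhile_append_dropWhile (p := PySem.Chars.isspace)]
    exact (List.reverse_reverse t).symm
  conv_rhs => rw [hdecomp]
  rw [split₀_space_suffix (fun x hx => List.mem_takeWhile_imp (List.mem_reverse.mp hx))]

theorem lower_strip_comm (s : List Char) :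
    PySem.Chars.lower (PySem.Chars.strip s) = PySem.Chars.strip (PySem.Chars.lower s) := by
  have hps : (PySem.Chars.isspace ∘ PySem.Chars.lowerChar) = PySem.Chars.isspace :=
    funext fun c => isspace_lowerChar c
  simp only [PySem.Chars.strip, PySem.Chars.lower, PySem.Chars.lstrip, PySem.Chars.rstrip,
    List.dropWhile_map, ← List.map_reverse, hps]

theorem split₀_lower_join (parts : List (List Char)) :
    PySem.Chars.split₀ (PySem.Chars.lower (PySem.Chars.join ['\n'] parts)) =
      parts.flatMap (fun p => PySem.Chars.split₀ (PySem.Chars.lower p)) := by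
  induction parts with
  | nil => rfl
  | cons p rest ih =>
    cases rest with
    | nil => simp [PySem.Chars.join, List.intercalate]
    | cons q rest' =>
      rw [PySem.Chars.join_cons_cons]
      have hl : PySem.Chars.lower (p ++ ['\n'] ++ PySem.Chars.join ['\n'] (q :: rest')) =
          PySem.Chars.lower p ++ '\n' :: PySem.Chars.lower (PySem.Chars.join ['\n'] (q :: rest')) := by
        simp [PySem.Chars.lower]
        rfl
      rw [hl, split₀_append_space (by decide), ih]
      simp

theorem tokenize_text_eq_flatMap (lines : List String) :
    tokenize_text lines =
      lines.flatMap (fun l => PySem.Str.split₀ (PySem.Str.lower (PySem.Str.strip l))) := by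
  have hstep : ∀ (t : List String) (l : String),
      (if PySem.Str.lower (PySem.Str.strip l) = "" then t
       else t ++ PySem.Str.split₀ (PySem.Str.lower (PySem.Str.strip l))) =
      t ++ PySem.Str.split₀ (PySem.Str.lower (PySem.Str.strip l)) := by
    intro t l
    split_ifs with h
    · rw [h]; simp [show PySem.Str.split₀ "" = [] from rfl]
    · rfl
  simp only [tokenize_text, hstep]
  rw [PySem.List.foldl_append_eq_flatMap]
  rfl

-- ===== VERDICT (by name: the statement is the Claim_ definition above) =====
theorem tokenize_text_spec : Claim_equal_tokenize_text := by
  intro lines _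
  unfold Spec_tokenize_text
  rw [tokenize_text_eq_flatMap]
  apply List.map_injective_iff.mpr (fun a b h => String.toList_injective h)
  have perline : ∀ cs : List Char,
      PySem.Chars.split₀ (PySem.Chars.lower (PySem.Chars.strip cs)) =
      PySem.Chars.split₀ (PySem.Chars.lower cs) := by
    intro cs; rw [lower_strip_comm, split₀_strip]
  simp only [tokenize_text_alt, List.map_flatMap, PySem.Str.split₀_map_toList,
    PySem.Str.toList_lower, PySem.Str.toList_strip, PySem.Str.toList_join, perline,
    show ("\n" : String).toList = ['\n'] from rfl, split₀_lower_join, List.flatMap_map]
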